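-- pv_equiv track=rewrite | github.com/wpedrak/advent_of_code_2020 | 19/solution2.py | is_message_valid
-- ===== SOURCE A (Python) =====
-- def is_message_valid(valid_strings_for_31, valid_strings_for_42, message):
--     chunk_messages_length = 8
--     if len(message) % chunk_messages_length != 0:
--         return False
--
--     chunked_message = [message[idx:idx + chunk_messages_length] for idx in range(0, len(message), chunk_messages_length)]
--     number_of_chunks = len(chunked_message)
--
--     for split_idx in range(number_of_chunks // 2 + 1, number_of_chunks):
--         if is_split_valid(valid_strings_for_31, valid_strings_for_42, chunked_message[:split_idx], chunked_message[split_idx:]):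
--             return True
--
--     return False
--
-- def is_split_valid(valid_strings_for_31, valid_strings_for_42, first_part, second_part):
--     assert len(first_part) > len(second_part)
--     for chunk in first_part:
--         if chunk not in valid_strings_for_42:
--             return False
--
--     for chunk in second_part:
--         if chunk not in valid_strings_for_31:
--             return False
--
--     return True
-- ===== SOURCE B (Python) =====
-- def is_message_valid(valid_strings_for_31, valid_strings_for_42, message):
--     chunk_len = 8
--     if len(message) % chunk_len != 0:
--         return False
--     chunks = [message[i:i + chunk_len] for i in range(0, len(message), chunk_len)]
--     n = len(chunks)
--     set42 = set(valid_strings_for_42)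
--     set31 = set(valid_strings_for_31)
--     p = _prefix_run(chunks, set42)
--     s = _prefix_run(list(reversed(chunks)), set31)
--     return max(n // 2 + 1, n - s) <= min(p, n - 1)
--
-- def _prefix_run(chunks, valid):
--     run = 0
--     for c in chunks:
--         if c not in valid:
--             break
--         run += 1
--     return run
-- ===== Notes on version B (the rewrite author's own statement) =====
-- stated objective: alternative
-- what changed: Instead of trying every split point and rescanning both halves against the valid lists, B precomputes in one pass the longest chunk prefix valid for 42 and the longest chunk suffix valid for 31 (using sets), and answers by intersecting that with the allowed split range.
import Mathlib
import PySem

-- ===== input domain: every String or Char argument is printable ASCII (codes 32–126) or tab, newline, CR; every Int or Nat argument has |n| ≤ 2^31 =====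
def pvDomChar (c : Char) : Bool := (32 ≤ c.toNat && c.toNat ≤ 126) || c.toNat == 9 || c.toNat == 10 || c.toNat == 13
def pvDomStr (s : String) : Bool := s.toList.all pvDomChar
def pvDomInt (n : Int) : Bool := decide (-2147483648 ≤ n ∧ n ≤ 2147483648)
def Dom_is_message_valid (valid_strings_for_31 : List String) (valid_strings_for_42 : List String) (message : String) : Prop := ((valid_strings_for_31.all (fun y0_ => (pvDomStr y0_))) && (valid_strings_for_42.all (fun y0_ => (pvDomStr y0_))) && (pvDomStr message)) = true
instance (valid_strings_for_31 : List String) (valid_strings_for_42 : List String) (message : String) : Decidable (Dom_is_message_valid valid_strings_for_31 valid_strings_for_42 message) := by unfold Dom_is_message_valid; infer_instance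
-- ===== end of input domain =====

-- B replaces A's try-every-split-and-rescan-both-halves search by a single-pass precomputation
-- (longest 42-valid chunk prefix, longest 31-valid chunk suffix, via sets) intersected with the split range.

-- ===== PORT A =====
-- for chunk in first_part: if chunk not in 42 → False; for chunk in second_part: if chunk not in 31 → False; True
-- (the assert in A always holds at A's call sites: split_idx > n // 2 forces len(first) > len(second))
def is_split_valid (valid_strings_for_31 : List String) (valid_strings_for_42 : List String)
    (first_part : List String) (second_part : List String) : Bool :=
  first_part.all (fun chunk => valid_strings_for_42.contains chunk) &&
  second_part.all (fun chunk => valid_strings_for_31.contains chunk)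

def is_message_valid (valid_strings_for_31 : List String) (valid_strings_for_42 : List String) (message : String) : Bool :=
  if PySem.Int.mod (PySem.Str.len message) 8 ≠ 0 then false
  else
    let chunked_message :=
      (PySem.List.pyRange 0 (PySem.Str.len message) 8).map
        (fun idx => PySem.Str.slice message (some idx) (some (idx + 8)))
    let number_of_chunks := PySem.List.len chunked_message
    (PySem.List.pyRange (PySem.Int.floordiv number_of_chunks 2 + 1) number_of_chunks 1).any
      (fun split_idx =>
        is_split_valid valid_strings_for_31 valid_strings_for_42
          (PySem.List.slice chunked_message none (some split_idx))
          (PySem.List.slice chunked_message (some split_idx) none))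

-- ===== PORT B =====
-- run = 0; for c in chunks: if c not in valid: break; run += 1; return run
def pv_prefix_run (chunks : List String) (valid : PySem.Set String) : Int :=
  match chunks with
  | [] => 0
  | c :: rest => if PySem.Set.contains valid c then 1 + pv_prefix_run rest valid else 0

def is_message_valid_alt (valid_strings_for_31 : List String) (valid_strings_for_42 : List String) (message : String) : Bool :=
  if PySem.Int.mod (PySem.Str.len message) 8 ≠ 0 then false
  else
    let chunks :=
      (PySem.List.pyRange 0 (PySem.Str.len message) 8).map
        (fun i => PySem.Str.slice message (some i) (some (i + 8)))
    let n := PySem.List.len chunks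
    let set42 := PySem.Set.ofList valid_strings_for_42
    let set31 := PySem.Set.ofList valid_strings_for_31
    let p := pv_prefix_run chunks set42
    let s := pv_prefix_run chunks.reverse set31
    decide (max (PySem.Int.floordiv n 2 + 1) (n - s) ≤ min p (n - 1))

-- ===== PRECONDITION & SPEC =====
def Spec_is_message_valid (valid_strings_for_31 : List String) (valid_strings_for_42 : List String) (message : String) (out : Bool) : Prop := out = is_message_valid_alt valid_strings_for_31 valid_strings_for_42 message
instance (valid_strings_for_31 : List String) (valid_strings_for_42 : List String) (message : String) (out : Bool) : Decidable (Spec_is_message_valid valid_strings_for_31 valid_strings_for_42 message out) := by unfold Spec_is_message_valid; infer_instance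

-- ===== CLAIM (what is proved, stated in full; the proofs are below) =====
def Claim_equal_is_message_valid : Prop := ∀ (valid_strings_for_31 : List String) (valid_strings_for_42 : List String) (message : String), Dom_is_message_valid valid_strings_for_31 valid_strings_for_42 message → Spec_is_message_valid valid_strings_for_31 valid_strings_for_42 message (is_message_valid valid_strings_for_31 valid_strings_for_42 message)

-- ===== LEMMAS AND PROOFS =====

-- pv_prefix_run is the length of the takeWhile-prefix of membership
theorem pv_prefix_run_eq (v : List String) (cs : List String) :
    pv_prefix_run cs (PySem.Set.ofList v)
      = ((cs.takeWhile (fun c => v.contains c)).length : Int) := by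
  induction cs with
  | nil => simp [pv_prefix_run]
  | cons c rest ih =>
    simp only [pv_prefix_run, List.takeWhile]
    have : PySem.Set.contains (PySem.Set.ofList v) c = v.contains c := by
      simp [PySem.Set.contains_eq_listContains]
    rw [this]
    cases h : v.contains c with
    | true => simp [ih]; omega
    | false => simp

-- a prefix of length m is all-valid iff m does not exceed the takeWhile length
theorem take_all_iff (P : String → Bool) (cs : List String) (m : Nat) (hm : m ≤ cs.length) :
    ((cs.take m).all P = true) ↔ m ≤ (cs.takeWhile P).length := by
  induction cs generalizing m with
  | nil => simp_all
  | cons c rest ih =>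
    cases m with
    | zero => simp
    | succ k =>
      simp only [List.take_succ_cons, List.all_cons, List.takeWhile]
      cases h : P c with
      | true =>
        simp only [Bool.true_and, List.length_cons]
        rw [ih k (by simpa using hm)]
        omega
      | false => simp

theorem drop_all_iff (P : String → Bool) (cs : List String) (m : Nat) :
    ((cs.drop m).all P = true) ↔ cs.length - m ≤ (cs.reverse.takeWhile P).length := by
  rw [← List.all_reverse, List.reverse_drop]
  exact take_all_iff P cs.reverse (cs.length - m) (by simp)

-- the split-search over the range equals the closed-form intersection test
theorem core_lemma (v31 v42 : List String) (cs : List String) :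
    ((PySem.List.pyRange (PySem.Int.floordiv (PySem.List.len cs) 2 + 1) (PySem.List.len cs) 1).any
      (fun k =>
        is_split_valid v31 v42
          (PySem.List.slice cs none (some k))
          (PySem.List.slice cs (some k) none)))
    = decide (max (PySem.Int.floordiv (PySem.List.len cs) 2 + 1)
                  ((PySem.List.len cs) - pv_prefix_run cs.reverse (PySem.Set.ofList v31))
              ≤ min (pv_prefix_run cs (PySem.Set.ofList v42)) ((PySem.List.len cs) - 1)) := by
  set n : Int := PySem.List.len cs with hn
  have hn' : n = (cs.length : Int) := by simp [hn, PySem.List.len_eq]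
  have hq : PySem.Int.floordiv n 2 = n / 2 := PySem.Int.floordiv_eq_ediv_of_pos (by norm_num)
  rw [pv_prefix_run_eq, pv_prefix_run_eq]
  set p : Nat := (cs.takeWhile (fun c => v42.contains c)).length with hp
  set s : Nat := (cs.reverse.takeWhile (fun c => v31.contains c)).length with hs
  by_cases hEx : ∃ k : Int, n / 2 + 1 ≤ k ∧ k < n ∧ k ≤ (p : Int) ∧ n - k ≤ (s : Int)
  · obtain ⟨k, hk1, hk2, hk3, hk4⟩ := hEx
    have hk0 : 0 ≤ k := by omega
    have hkn : k.toNat ≤ cs.length := by omega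
    have hmem : k ∈ PySem.List.pyRange (PySem.Int.floordiv n 2 + 1) n 1 := by
      rw [PySem.List.mem_pyRange_one]; omega
    have hval : is_split_valid v31 v42 (PySem.List.slice cs none (some k)) (PySem.List.slice cs (some k) none) = true := by
      rw [PySem.List.slice_to _ hk0, PySem.List.slice_from _ hk0]
      unfold is_split_valid
      rw [Bool.and_eq_true]
      constructor
      · exact (take_all_iff _ cs k.toNat hkn).2 (by omega)
      · exact (drop_all_iff _ cs k.toNat).2 (by omega)
    have hany : ((PySem.List.pyRange (PySem.Int.floordiv n 2 + 1) n 1).any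
        (fun k => is_split_valid v31 v42 (PySem.List.slice cs none (some k)) (PySem.List.slice cs (some k) none))) = true := by
      rw [List.any_eq_true]; exact ⟨k, hmem, hval⟩
    rw [hany]
    have : max (PySem.Int.floordiv n 2 + 1) (n - (s : Int)) ≤ min ((p : Int)) (n - 1) := by
      rw [hq]; omega
    exact (decide_eq_true this).symm
  · have hany : ((PySem.List.pyRange (PySem.Int.floordiv n 2 + 1) n 1).any
        (fun k => is_split_valid v31 v42 (PySem.List.slice cs none (some k)) (PySem.List.slice cs (some k) none))) = false := by
      rw [Bool.eq_false_iff]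
      intro hmTrue
      rw [List.any_eq_true] at hmTrue
      obtain ⟨k, hmem, hval⟩ := hmTrue
      rw [PySem.List.mem_pyRange_one] at hmem
      obtain ⟨hk1, hk2⟩ := hmem
      rw [hq] at hk1
      have hk0 : 0 ≤ k := by omega
      have hkn : k.toNat ≤ cs.length := by omega
      rw [PySem.List.slice_to _ hk0, PySem.List.slice_from _ hk0] at hval
      unfold is_split_valid at hval
      rw [Bool.and_eq_true] at hval
      have h42 := (take_all_iff _ cs k.toNat hkn).1 hval.1
      have h31 := (drop_all_iff _ cs k.toNat).1 hval.2
      exact hEx ⟨k, by omega, hk2, by omega, by omega⟩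
    rw [hany]
    have : ¬ (max (PySem.Int.floordiv n 2 + 1) (n - (s : Int)) ≤ min ((p : Int)) (n - 1)) := by
      rw [hq]
      intro hle
      exact hEx ⟨max (n / 2 + 1) (n - (s : Int)), by omega, by omega, by omega, by omega⟩
    exact (decide_eq_false this).symm

-- ===== VERDICT (by name: the statement is the Claim_ definition above) =====
theorem is_message_valid_spec : Claim_equal_is_message_valid := by
  intro v31 v42 message _
  unfold Spec_is_message_valid is_message_valid is_message_valid_alt
  by_cases h : PySem.Int.mod (PySem.Str.len message) 8 ≠ 0
  · rw [if_pos h, if_pos h]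
  · rw [if_neg h, if_neg h]
    exact core_lemma v31 v42 _
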